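-- pv_equiv track=rewrite | github.com/ericmerle3789/Collatz-Junction-Theorem | scripts/tools/session10f7_crt_mechanism2.py | find_all_solutions_mod_p
-- ===== SOURCE A (Python) =====
-- from itertools import combinations_with_replacement
-- from math import comb
--
-- def compute_u(k, p):
--     return (2 * pow(3, -1, p)) % p
--
-- def find_all_solutions_mod_p(k, p, M):
--     """Trouve TOUTES les séquences B non-décroissantes dans [0,M] tq f(B)≡-1 mod p.
--     Retourne la liste des tuples B solutions."""
--     u = compute_u(k, p)
--     u_pows = [pow(u, j, p) for j in range(k)]
--     target = (-1) % p
--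
--     solutions = []
--     n = k - 1  # nombre de variables B₁,...,B_{k-1}
--     n_comb = comb(M + n, n)
--
--     if n_comb > 500000:
--         return None  # Trop grand pour énumération
--
--     for B in combinations_with_replacement(range(M + 1), n):
--         val = sum(u_pows[j+1] * pow(2, B[j], p) for j in range(n)) % p
--         if val == target:
--             solutions.append(B)
--
--     return solutions
-- ===== SOURCE B (Python) =====
-- def find_all_solutions_mod_p(k, p, M):
--     """Same results as A, but: precomputed pow(2, b, p) table, breadth-first
--     lexicographic extension of suffix-shared reversed prefixes, and the running
--     sum maintained incrementally (one mul+add+mod per extension) instead of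
--     recomputing n modular powers and a full sum for every tuple."""
--     u = (2 * pow(3, -1, p)) % p
--     n = k - 1
--     # comb(M + n, n) > 500000 decided incrementally: c runs through comb(M + i, i),
--     # which is non-decreasing in i, so we can stop as soon as the cap is passed
--     c = 1
--     if M >= 1:
--         for i in range(1, n + 1):
--             c = c * (M + i) // i
--             if c > 500000:
--                 return None
--     u_pows = [pow(u, j, p) for j in range(k)]
--     pow2 = []
--     v = 1 % p
--     for _ in range(M + 1):
--         pow2.append(v)
--         v = v * 2 % p
--     target = (-1) % p
--     # state = (reversed chain of chosen values as nested pairs, last value, running sum)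
--     frontier = [(None, 0, 0)]
--     for j in range(n):
--         frontier = [((b, t), b, (acc + u_pows[j + 1] * pow2[b]) % p)
--                     for (t, lo, acc) in frontier
--                     for b in range(lo, M + 1)]
--     out = []
--     for (t, lo, acc) in frontier:
--         if acc == target:
--             rev = []
--             while t is not None:
--                 b, t = t
--                 rev.append(b)
--             out.append(tuple(reversed(rev)))
--     return out
-- ===== Notes on version B (the rewrite author's own statement) =====
-- stated objective: faster
-- what changed: B decides the 500000-cap by running the binomial up incrementally with early exit (A always computes the full, possibly astronomically large comb(M+n,n)), and enumerates by growing the non-decreasing tuples level by level as suffix-shared reversed chains with an incrementally built pow(2,b,p) table and a running modular sum (one multiply-add-mod per extension), instead of A's per-tuple fresh pow calls and full n-term sums over itertools.combinations_with_replacement.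
import Mathlib
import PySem

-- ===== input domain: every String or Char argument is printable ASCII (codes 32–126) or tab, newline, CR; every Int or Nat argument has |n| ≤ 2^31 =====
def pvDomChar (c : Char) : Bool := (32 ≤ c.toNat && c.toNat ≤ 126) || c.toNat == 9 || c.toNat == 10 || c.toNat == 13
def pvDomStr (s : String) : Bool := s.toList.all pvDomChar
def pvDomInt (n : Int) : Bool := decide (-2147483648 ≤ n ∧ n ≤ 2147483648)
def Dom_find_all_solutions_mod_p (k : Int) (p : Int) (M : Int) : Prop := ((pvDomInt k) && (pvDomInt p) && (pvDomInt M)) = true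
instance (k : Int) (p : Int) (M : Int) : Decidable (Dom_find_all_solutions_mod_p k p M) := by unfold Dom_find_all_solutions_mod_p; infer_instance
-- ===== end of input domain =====

-- B decides the 500000-cap with an early-exit incremental binomial (A computes the full
-- comb(M+n,n)) and replaces A's per-tuple recomputation (combinations_with_replacement +
-- a fresh modular power and full sum for every tuple) by an incrementally built
-- pow(2,·,p) table and a breadth-first lexicographic extension of shared reversed
-- prefixes whose running modular sum is maintained incrementally (objective: faster).

-- ===== PORT A =====

-- pow(3, -1, p): a representative of the inverse of 3 mod p; exact (after the enclosing
-- '% p') wherever Python's pow(3, -1, p) succeeds, i.e. p ≠ 0 and 3 ∤ p, since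
-- 3 * pyinv3 p ≡ 1 (mod p) there and only the residue class mod p is used.
def pyinv3 (p : Int) : Int :=
  let q : Int := p.natAbs
  if PySem.Int.mod q 3 = 1 then (2 * q + 1) / 3 else (q + 1) / 3

def compute_u (_k : Int) (p : Int) : Int := PySem.Int.mod (2 * pyinv3 p) p

-- [pow(u, j, p) for j in range(k)]  (exponent j is ≥ 0 on every element, so .toNat is exact)
def upows (k u p : Int) : List Int :=
  (PySem.List.pyRange 0 k).map (fun j => PySem.Int.powMod u j.toNat p)

-- list(itertools.combinations_with_replacement(xs, n)) as lists, in CPython's order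
def cwr : List Int → Nat → List (List Int)
  | _, 0 => [[]]
  | [], _ + 1 => []
  | x :: rest, n + 1 => ((cwr (x :: rest) n).map (fun B => x :: B)) ++ cwr rest (n + 1)
  termination_by xs n => (xs.length, n)
  decreasing_by
  · exact Prod.Lex.right _ (Nat.lt_succ_self _)
  · exact Prod.Lex.left _ _ (by simp)

-- u_pows[j+1] and B[j] are in range by construction (len u_pows = k = n+1, len B = n), so getD is exact
def find_all_solutions_mod_p (k : Int) (p : Int) (M : Int) : Option (List (List Int)) :=
  let u := compute_u k p
  let u_pows := upows k u p
  let target := PySem.Int.mod (-1) p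
  let n := k - 1
  let n_comb := Nat.choose (M + n).toNat n.toNat
  if n_comb > 500000 then none
  else
    some ((cwr (PySem.List.pyRange 0 (M + 1)) n.toNat).foldl
      (fun sols B =>
        let val := PySem.Int.mod ((List.range n.toNat).foldl
          (fun s j => s + u_pows.getD (j + 1) 0 * PySem.Int.powMod 2 (B.getD j 0).toNat p) 0) p
        if val = target then sols ++ [B] else sols) [])

-- ===== PORT B =====

-- (acc + u_pows[j+1] * pow2[b]) % p   (pow2[b] in range by construction: 0 ≤ b ≤ M)
def accStep (U P2 : List Int) (p : Int) (j : Nat) (a b : Int) : Int :=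
  PySem.Int.mod (a + U.getD (j + 1) 0 * P2.getD b.toNat 0) p

-- one level of the breadth-first extension: state = (reversed chain, last value, running sum)
def bfsStep (U P2 : List Int) (p M : Int) (j : Nat) (fr : List (List Int × Int × Int)) :
    List (List Int × Int × Int) :=
  fr.flatMap (fun st =>
    (PySem.List.pyRange st.2.1 (M + 1)).map (fun b => (b :: st.1, b, accStep U P2 p j st.2.2 b)))

-- the early-exit cap test: c runs through comb(M+i, i) (one mul+div per step),
-- non-decreasing in i, so the loop may stop as soon as c passes 500000; r = n+1-i steps left
def combLoop (M : Int) : Nat → Nat → Nat → Bool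
  | 0, _, _ => false
  | r + 1, i, c =>
      let c' := c * (M + i).toNat / i
      if 500000 < c' then true else combLoop M r (i + 1) c'

-- the pow(2, ·, p) table built incrementally: append v, then v = v * 2 % p
def pow2Table (p M : Int) : List Int :=
  ((List.range (M + 1).toNat).foldl
    (fun s _ => (s.1 ++ [s.2], PySem.Int.mod (s.2 * 2) p))
    (([] : List Int), PySem.Int.mod 1 p)).1

def find_all_solutions_mod_p_alt (k : Int) (p : Int) (M : Int) : Option (List (List Int)) :=
  let u := compute_u k p
  let n := k - 1
  if 1 ≤ M ∧ combLoop M n.toNat 1 1 = true then none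
  else
    let u_pows := upows k u p
    let pow2 := pow2Table p M
    let target := PySem.Int.mod (-1) p
    let frontier := (List.range n.toNat).foldl (fun fr j => bfsStep u_pows pow2 p M j fr)
      [(([] : List Int), (0 : Int), (0 : Int))]
    some (frontier.foldl (fun out st => if st.2.2 = target then out ++ [st.1.reverse] else out) [])

-- ===== PRECONDITION & SPEC =====
-- exactly the inputs on which the Python A returns: pow(3, -1, p) needs p ≠ 0 and 3
-- invertible mod p (else ValueError), and comb(M + k - 1, k - 1) needs both arguments ≥ 0
def Pre_find_all_solutions_mod_p (k : Int) (p : Int) (M : Int) : Prop :=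
  p ≠ 0 ∧ ¬ (3 ∣ p) ∧ 1 ≤ k ∧ 0 ≤ M + k - 1
instance (k : Int) (p : Int) (M : Int) : Decidable (Pre_find_all_solutions_mod_p k p M) := by
  unfold Pre_find_all_solutions_mod_p; infer_instance

def pvWitness_find_all_solutions_mod_p : Int × Int × Int := (2, 5, 2)

def Spec_find_all_solutions_mod_p (k : Int) (p : Int) (M : Int) (out : Option (List (List Int))) : Prop :=
  out = find_all_solutions_mod_p_alt k p M
instance (k : Int) (p : Int) (M : Int) (out : Option (List (List Int))) :
    Decidable (Spec_find_all_solutions_mod_p k p M out) := by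
  unfold Spec_find_all_solutions_mod_p; infer_instance

-- ===== CLAIM (what is proved, stated in full; the proofs are below) =====
def Claim_equal_find_all_solutions_mod_p : Prop := ∀ (k : Int) (p : Int) (M : Int), Dom_find_all_solutions_mod_p k p M → Pre_find_all_solutions_mod_p k p M → Spec_find_all_solutions_mod_p k p M (find_all_solutions_mod_p k p M)

-- ===== LEMMAS AND PROOFS =====

theorem pv_witness_ok :
    Dom_find_all_solutions_mod_p pvWitness_find_all_solutions_mod_p.1
      pvWitness_find_all_solutions_mod_p.2.1 pvWitness_find_all_solutions_mod_p.2.2 ∧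
    Pre_find_all_solutions_mod_p pvWitness_find_all_solutions_mod_p.1
      pvWitness_find_all_solutions_mod_p.2.1 pvWitness_find_all_solutions_mod_p.2.2 := by
  decide

theorem pv_choose_step (a k : Nat) :
    Nat.choose (a + (k + 1)) (k + 1) = Nat.choose (a + k) k * (a + (k + 1)) / (k + 1) := by
  have h := Nat.add_one_mul_choose_eq (a + k) k
  have h2 : Nat.choose (a + k) k * (a + (k + 1)) = Nat.choose (a + (k + 1)) (k + 1) * (k + 1) := by
    have e : a + (k + 1) = a + k + 1 := by omega
    rw [e, Nat.mul_comm]; omega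
  rw [h2, Nat.mul_div_cancel _ (by omega)]

theorem pv_choose_mono (a i : Nat) : ∀ r, Nat.choose (a + i) i ≤ Nat.choose (a + i + r) (i + r) := by
  intro r
  induction r with
  | zero => simp
  | succ t iht =>
      have e1 : a + i + (t + 1) = (a + i + t) + 1 := by omega
      have e2 : i + (t + 1) = (i + t) + 1 := by omega
      rw [e1, e2, Nat.choose_succ_succ]
      omega

theorem combLoop_eq (M : Int) (hM : 1 ≤ M) :
    ∀ (r i : Nat), 1 ≤ i →
      ∀ c : Nat, c = Nat.choose (M.toNat + (i - 1)) (i - 1) → c ≤ 500000 →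
        combLoop M r i c = decide (500000 < Nat.choose (M.toNat + (i - 1) + r) ((i - 1) + r)) := by
  intro r
  induction r with
  | zero =>
      intro i _ c hc hle
      simp only [combLoop, Nat.add_zero]
      have hnot : ¬ 500000 < Nat.choose (M.toNat + (i - 1)) (i - 1) := by omega
      simp [hnot]
  | succ t iht =>
      intro i hi c hc hle
      have hMi : (M + i).toNat = M.toNat + i := by omega
      have hstep : c * (M + i).toNat / i = Nat.choose (M.toNat + i) i := by
        rw [hMi, hc]
        have e : i = (i - 1) + 1 := by omega
        rw [e, pv_choose_step M.toNat (i - 1), ← e]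
      show (if 500000 < c * (M + i).toNat / i then true
            else combLoop M t (i + 1) (c * (M + i).toNat / i)) = _
      rw [hstep]
      by_cases hgt : 500000 < Nat.choose (M.toNat + i) i
      · rw [if_pos hgt]
        have hmono := pv_choose_mono M.toNat i t
        have e : M.toNat + (i - 1) + (t + 1) = M.toNat + i + t := by omega
        have e2 : (i - 1) + (t + 1) = i + t := by omega
        rw [e, e2]
        have := le_trans hgt.le (le_trans (le_refl _) hmono)
        simp
        omega
      · rw [if_neg hgt]
        rw [iht (i + 1) (by omega) _ (by simp) (by omega)]
        have e : M.toNat + (i + 1 - 1) + t = M.toNat + (i - 1) + (t + 1) := by omega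
        have e2 : (i + 1 - 1) + t = (i - 1) + (t + 1) := by omega
        rw [e, e2]

theorem guard_iff (k M : Int) (hk : 1 ≤ k) (hMn : 0 ≤ M + k - 1) :
    (1 ≤ M ∧ combLoop M (k - 1).toNat 1 1 = true)
      ↔ 500000 < Nat.choose (M + (k - 1)).toNat (k - 1).toNat := by
  by_cases hM : 1 ≤ M
  · have h := combLoop_eq M hM (k - 1).toNat 1 (by omega) 1 (by simp) (by omega)
    simp only [hM, true_and]
    rw [h]
    have e : M.toNat + (1 - 1) + (k - 1).toNat = (M + (k - 1)).toNat := by omega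
    have e2 : (1 - 1) + (k - 1).toNat = (k - 1).toNat := by omega
    rw [e, e2]
    simp
  · constructor
    · intro h; exact absurd h.1 hM
    · intro h
      exfalso
      rcases lt_or_eq_of_le (by omega : M ≤ 0) with hlt | heq
      · have : (M + (k - 1)).toNat < (k - 1).toNat := by omega
        rw [Nat.choose_eq_zero_of_lt this] at h
        omega
      · have e : (M + (k - 1)).toNat = (k - 1).toNat := by omega
        rw [e, Nat.choose_self] at h
        omega

-- Python '%' respects the residue class of its left argument (any modulus)
theorem pv_mod_add_mod_left (a b p : Int) :
    PySem.Int.mod (PySem.Int.mod a p + b) p = PySem.Int.mod (a + b) p := by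
  have h : PySem.Int.mod a p + b = (a + b) + p * (-(a.fdiv p)) := by
    show a.fmod p + b = _
    rw [Int.fmod_def]; ring
  show (PySem.Int.mod a p + b).fmod p = (a + b).fmod p
  rw [h, Int.add_mul_fmod_self_left]

theorem pv_mod_mul_mod_left (a c p : Int) :
    PySem.Int.mod (PySem.Int.mod a p * c) p = PySem.Int.mod (a * c) p := by
  have h : PySem.Int.mod a p * c = a * c + p * (-(a.fdiv p) * c) := by
    show a.fmod p * c = _
    rw [Int.fmod_def]; ring
  show (PySem.Int.mod a p * c).fmod p = (a * c).fmod p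
  rw [h]
  exact Int.add_mul_fmod_self_left _ _ _

theorem pow2Table_eq (p M : Int) :
    pow2Table p M = (PySem.List.pyRange 0 (M + 1)).map (fun b => PySem.Int.powMod 2 b.toNat p) := by
  have key : ∀ m : Nat,
      (List.range m).foldl (fun s (_ : Nat) => (s.1 ++ [s.2], PySem.Int.mod (s.2 * 2) p))
        (([] : List Int), PySem.Int.mod 1 p)
      = ((List.range m).map (fun i => PySem.Int.mod (2 ^ i) p), PySem.Int.mod (2 ^ m) p) := by
    intro m
    induction m with
    | zero => simp
    | succ t iht =>
        rw [List.range_succ, List.foldl_append, iht, List.foldl_cons, List.foldl_nil,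
          List.map_append]
        refine Prod.ext rfl ?_
        show PySem.Int.mod (PySem.Int.mod (2 ^ t) p * 2) p = _
        rw [pv_mod_mul_mod_left]
        norm_num [pow_succ]
  rw [pow2Table, key, PySem.List.pyRange_one, List.map_map]
  show _ = List.map _ (List.range (M + 1 - 0).toNat)
  rw [show M + 1 - 0 = M + 1 by ring]
  apply List.map_congr_left
  intro i _
  simp [PySem.Int.powMod, PySem.Int.mod]

-- the running sum of A's inner generator, recursively over the tuple (offset index i)
def sumFun (U : List Int) (p : Int) : Nat → List Int → Int
  | _, [] => 0
  | i, b :: bs => U.getD (i + 1) 0 * PySem.Int.powMod 2 b.toNat p + sumFun U p (i + 1) bs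

-- the incrementally maintained accumulator of B, recursively over the tuple
def accFun (U P2 : List Int) (p : Int) : Nat → Int → List Int → Int
  | _, a, [] => a
  | i, a, b :: bs => accFun U P2 p (i + 1) (accStep U P2 p i a b) bs

theorem accFun_append (U P2 : List Int) (p : Int) (b : Int) :
    ∀ (B : List Int) (i : Nat) (a : Int),
      accFun U P2 p i a (B ++ [b]) = accStep U P2 p (i + B.length) (accFun U P2 p i a B) b := by
  intro B
  induction B with
  | nil => intro i a; simp [accFun]
  | cons x xs ih =>
      intro i a
      simp only [List.cons_append, accFun, ih, List.length_cons]
      ring_nf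

theorem pow2_getD (p M b : Int) (h0 : 0 ≤ b) (h1 : b ≤ M) :
    ((PySem.List.pyRange 0 (M + 1)).map (fun x => PySem.Int.powMod 2 x.toNat p)).getD b.toNat 0
      = PySem.Int.powMod 2 b.toNat p := by
  have hlen : b.toNat < (PySem.List.pyRange 0 (M + 1)).length := by
    rw [PySem.List.length_pyRange_one]; omega
  rw [List.getD_eq_getElem _ _ (by simpa using hlen), List.getElem_map]
  congr 1
  have := PySem.List.getElem_pyRange_one 0 (M + 1) b.toNat hlen
  rw [this]; omega

theorem accFun_eq_mod_sum (U : List Int) (p M : Int) :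
    ∀ (B : List Int), (∀ b ∈ B, 0 ≤ b ∧ b ≤ M) → ∀ (i : Nat) (a : Int),
      accFun U ((PySem.List.pyRange 0 (M + 1)).map (fun x => PySem.Int.powMod 2 x.toNat p)) p
          i (PySem.Int.mod a p) B
        = PySem.Int.mod (a + sumFun U p i B) p := by
  intro B
  induction B with
  | nil => intro _ i a; simp [accFun, sumFun]
  | cons b bs ih =>
      intro hmem i a
      have hb := hmem b (by simp)
      simp only [accFun, accStep, sumFun]
      rw [pow2_getD p M b hb.1 hb.2, pv_mod_add_mod_left]
      rw [ih (fun x hx => hmem x (by simp [hx])) (i + 1) (a + U.getD (i + 1) 0 * PySem.Int.powMod 2 b.toNat p)]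
      ring_nf

-- A's indexed inner sum over range(n) equals the structural sum over the tuple
theorem foldl_range_sum (U : List Int) (p : Int) :
    ∀ (B : List Int) (i : Nat) (c : Int),
      (List.range B.length).foldl
          (fun s j => s + U.getD (i + j + 1) 0 * PySem.Int.powMod 2 (B.getD j 0).toNat p) c
        = c + sumFun U p i B := by
  intro B
  induction B with
  | nil => intro i c; simp [sumFun]
  | cons b bs ih =>
      intro i c
      simp only [List.length_cons, List.range_succ_eq_map, List.foldl_cons, List.foldl_map]
      have h1 : ∀ (s : Int) (j : Nat),
          s + U.getD (i + (j + 1) + 1) 0 * PySem.Int.powMod 2 ((b :: bs).getD (j + 1) 0).toNat p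
            = s + U.getD ((i + 1) + j + 1) 0 * PySem.Int.powMod 2 (bs.getD j 0).toNat p := by
        intro s j
        have h2 : i + (j + 1) + 1 = i + 1 + j + 1 := by omega
        rw [h2, List.getD_cons_succ]
      calc (List.range bs.length).foldl
            (fun s j => s + U.getD (i + (j + 1) + 1) 0 * PySem.Int.powMod 2 ((b :: bs).getD (j + 1) 0).toNat p)
            (c + U.getD (i + 0 + 1) 0 * PySem.Int.powMod 2 ((b :: bs).getD 0 0).toNat p)
          = (List.range bs.length).foldl
            (fun s j => s + U.getD ((i + 1) + j + 1) 0 * PySem.Int.powMod 2 (bs.getD j 0).toNat p)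
            (c + U.getD (i + 0 + 1) 0 * PySem.Int.powMod 2 ((b :: bs).getD 0 0).toNat p) := by
            exact PySem.List.foldl_congr_mem _ _ _ _ (fun s j _ => h1 s j)
        _ = c + sumFun U p i (b :: bs) := by
            rw [ih (i + 1)]
            simp only [sumFun, List.getD_cons_zero]
            ring

theorem pv_flatMap_congr {a b : Type} (l : List a) (f g : a → List b)
    (h : ∀ x ∈ l, f x = g x) : l.flatMap f = l.flatMap g := by
  induction l with
  | nil => rfl
  | cons x xs ihx =>
      simp only [List.flatMap_cons, h x (by simp), ihx (fun y hy => h y (by simp [hy]))]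


theorem mem_cwr : ∀ (xs : List Int) (n : Nat) (B : List Int), B ∈ cwr xs n →
    B.length = n ∧ ∀ b ∈ B, b ∈ xs := by
  intro xs n
  induction xs, n using cwr.induct with
  | case1 xs => intro B hB; simp [cwr] at hB; simp [hB]
  | case2 n => intro B hB; simp [cwr] at hB
  | case3 x rest n ih1 ih2 =>
      intro B hB
      simp only [cwr, List.mem_append, List.mem_map] at hB
      rcases hB with ⟨C, hC, rfl⟩ | hB
      · obtain ⟨hlen, hmem⟩ := ih1 C hC
        constructor
        · simp [hlen]
        · intro b hb
          rcases List.mem_cons.mp hb with rfl | hb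
          · simp
          · exact hmem b hb
      · obtain ⟨hlen, hmem⟩ := ih2 B hB
        exact ⟨hlen, fun b hb => List.mem_cons_of_mem _ (hmem b hb)⟩


theorem cwr_pyRange_head (n : Nat) :
    ∀ (fuel : Nat) (lo hi : Int), (hi - lo).toNat = fuel →
      cwr (PySem.List.pyRange lo hi) (n + 1)
        = (PySem.List.pyRange lo hi).flatMap
            (fun b => (cwr (PySem.List.pyRange b hi) n).map (fun B => b :: B)) := by
  intro fuel
  induction fuel with
  | zero =>
      intro lo hi h
      have hle : hi ≤ lo := by omega
      rw [PySem.List.pyRange_one_eq_nil hle]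
      simp [cwr]
  | succ m ih =>
      intro lo hi h
      by_cases hlt : lo < hi
      · rw [PySem.List.pyRange_one_cons hlt]
        show cwr (lo :: PySem.List.pyRange (lo + 1) hi) (n + 1) = _
        rw [cwr]
        rw [List.flatMap_cons]
        congr 1
        · rw [← PySem.List.pyRange_one_cons hlt]
        · exact ih (lo + 1) hi (by omega)
      · rw [PySem.List.pyRange_one_eq_nil (by omega)]
        simp [cwr]


theorem cwr_pyRange_snoc :
    ∀ (j : Nat) (lo hi : Int),
      cwr (PySem.List.pyRange lo hi) (j + 1)
        = (cwr (PySem.List.pyRange lo hi) j).flatMap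
            (fun B => (PySem.List.pyRange (B.getLastD lo) hi).map (fun b => B ++ [b])) := by
  intro j
  induction j with
  | zero =>
      intro lo hi
      rw [cwr_pyRange_head 0 _ lo hi rfl]
      simp only [cwr, List.map_cons, List.map_nil, List.getLastD_nil, List.flatMap_cons,
        List.flatMap_nil, List.append_nil, List.nil_append]
      induction PySem.List.pyRange lo hi with
      | nil => rfl
      | cons a l ihl => simp only [List.flatMap_cons, List.map_cons, ihl, List.cons_append,
          List.nil_append]
  | succ m ih =>
      intro lo hi
      rw [cwr_pyRange_head (m + 1) _ lo hi rfl, cwr_pyRange_head m _ lo hi rfl]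
      rw [pv_flatMap_congr _ _
        (fun b => ((cwr (PySem.List.pyRange b hi) m).flatMap
          (fun B => (PySem.List.pyRange (B.getLastD b) hi).map (fun c => B ++ [c]))).map
            (fun B => b :: B))
        (fun b _ => by rw [ih b hi])]
      simp only [List.flatMap_assoc, List.flatMap_map, List.map_flatMap, List.map_map,
        Function.comp_def, List.getLastD_cons, List.cons_append]


theorem frontier_inv (U P2 : List Int) (p M : Int) :
    ∀ (j : Nat),
      (List.range j).foldl (fun fr i => bfsStep U P2 p M i fr) [(([] : List Int), (0 : Int), (0 : Int))]
        = (cwr (PySem.List.pyRange 0 (M + 1)) j).map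
            (fun B => (B.reverse, B.getLastD 0, accFun U P2 p 0 0 B)) := by
  intro j
  induction j with
  | zero => simp [cwr, accFun]
  | succ m ih =>
      rw [List.range_succ, List.foldl_append, ih, List.foldl_cons, List.foldl_nil]
      show bfsStep U P2 p M m _ = _
      rw [bfsStep, List.flatMap_map, cwr_pyRange_snoc m 0 (M + 1), List.map_flatMap]
      apply pv_flatMap_congr
      intro B hB
      obtain ⟨hlen, _⟩ := mem_cwr _ _ _ hB
      rw [List.map_map]
      apply List.map_congr_left
      intro b _
      simp only [Function.comp_apply, List.reverse_concat, List.getLastD_concat]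
      rw [accFun_append]
      simp [hlen]

theorem foldl_range_sum0 (U : List Int) (p : Int) (B : List Int) (c : Int) :
    (List.range B.length).foldl
        (fun s j => s + U.getD (j + 1) 0 * PySem.Int.powMod 2 (B.getD j 0).toNat p) c
      = c + sumFun U p 0 B := by
  have h := foldl_range_sum U p B 0 c
  simpa using h

-- ===== VERDICT (by name: the statement is the Claim_ definition above) =====
theorem find_all_solutions_mod_p_spec : Claim_equal_find_all_solutions_mod_p := by
  intro k p M _ hpre
  obtain ⟨hp0, h3, hk, hMn⟩ := hpre
  unfold Spec_find_all_solutions_mod_p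
  simp only [find_all_solutions_mod_p, find_all_solutions_mod_p_alt]
  have hg := guard_iff k M hk hMn
  split_ifs with h1 h2 h2
  · rfl
  · exact absurd (hg.mpr h1) h2
  · exact absurd (hg.mp h2) h1
  · rw [pow2Table_eq]
    congr 1
    rw [frontier_inv, List.foldl_map]
    apply PySem.List.foldl_congr_mem
    intro acc B hB
    obtain ⟨hlen, hmem⟩ := mem_cwr _ _ _ hB
    have hbd : ∀ b ∈ B, 0 ≤ b ∧ b ≤ M := by
      intro b hb
      have := PySem.List.mem_pyRange_one.mp (hmem b hb)
      omega
    have h0 : accFun (upows k (compute_u k p) p)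
        ((PySem.List.pyRange 0 (M + 1)).map (fun b => PySem.Int.powMod 2 b.toNat p)) p 0 0 B
        = PySem.Int.mod (sumFun (upows k (compute_u k p) p) p 0 B) p := by
      have hz : (0 : Int) = PySem.Int.mod 0 p := by
        show (0 : Int) = Int.fmod 0 p; simp
      calc accFun _ _ p 0 0 B
          = accFun (upows k (compute_u k p) p) _ p 0 (PySem.Int.mod 0 p) B := by rw [← hz]
        _ = PySem.Int.mod (0 + sumFun (upows k (compute_u k p) p) p 0 B) p :=
            accFun_eq_mod_sum _ p M B hbd 0 0
        _ = _ := by rw [zero_add]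
    have h1 : (List.range (k - 1).toNat).foldl
        (fun s j => s + (upows k (compute_u k p) p).getD (j + 1) 0 *
          PySem.Int.powMod 2 (B.getD j 0).toNat p) 0
        = sumFun (upows k (compute_u k p) p) p 0 B := by
      rw [← hlen, foldl_range_sum0, zero_add]
    rw [h0, h1, List.reverse_reverse]
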